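-- pv_equiv track=rewrite | github.com/GhostMeshIO/Anti-Gravity-RND | The Archimedes Experiment/src/sim2_topological_stability.py | partition_kitaev_preskill
-- ===== SOURCE A (Python) =====
-- from typing import Dict, List, Tuple, Any, Optional
--
-- def partition_kitaev_preskill(d: int) -> Dict[str, List[int]]:
--     """
--     Kitaev-Preskill partition for TEE extraction.
--
--     CRITICAL: Regions A, B, C must NOT cover the entire lattice.
--     A remaining region D ensures the formula is non-trivial:
--         gamma = S_A + S_B + S_C - S_AB - S_AC - S_BC
--
--     Layout (d=5):
--         A A B B .
--         . . . . .
--         C C C C .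
--         . . . . .
--         . . . . .
--
--     A, B, C touch at the boundary point (0,2)-(1,1).
--     D = remaining qubits (bulk).
--
--     For d=3, the lattice is too small for a meaningful KP partition.
--     """
--     n = d * d
--     if d < 5:
--         # For d=3, use a partition that leaves D non-empty
--         # A = {(0,0)}, B = {(0,2)}, C = strip connecting them
--         # But with only 9 qubits, TEE = 0 is expected regardless
--         A = [0]  # (0,0)
--         B = [2]  # (0,2)
--         C = [3, 6]  # left column below A (vertical strip)
--         # D = {1, 4, 5, 7, 8}
--         return {
--             'A': A, 'B': B, 'C': C,
--             'AB': A + B, 'AC': A + C, 'BC': B + C,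
--             'ABC': list(range(n)),
--             'D': [1, 4, 5, 7, 8],
--         }
--
--     # For d >= 5: proper KP partition with non-trivial D
--     r_div = d // 3
--     c_div = 2 * d // 3
--
--     A = []
--     B = []
--     C = []
--     for r in range(d):
--         for c in range(d):
--             idx = r * d + c
--             if r < r_div and c < c_div:
--                 A.append(idx)
--             elif r < r_div and c >= c_div:
--                 B.append(idx)
--             elif r == r_div:
--                 C.append(idx)
--             # else: D (bulk)
--
--     return {
--         'A': A, 'B': B, 'C': C,
--         'AB': A + B, 'AC': A + C, 'BC': B + C,
--         'ABC': list(range(n)),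
--         'D': [i for i in range(n) if i not in set(A + B + C)],
--     }
-- ===== SOURCE B (Python) =====
-- def partition_kitaev_preskill(d: int):
--     """Kitaev-Preskill partition, built directly from index ranges."""
--     n = d * d
--     if d < 5:
--         A, B, C = [0], [2], [3, 6]
--         return {
--             'A': A, 'B': B, 'C': C,
--             'AB': A + B, 'AC': A + C, 'BC': B + C,
--             'ABC': list(range(n)),
--             'D': [1, 4, 5, 7, 8],
--         }
--     r_div = d // 3
--     c_div = 2 * d // 3
--     # Each region is given directly by its index ranges (row-major order).
--     A = [r * d + c for r in range(r_div) for c in range(c_div)]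
--     B = [r * d + c for r in range(r_div) for c in range(c_div, d)]
--     C = list(range(r_div * d, (r_div + 1) * d))
--     return {
--         'A': A, 'B': B, 'C': C,
--         'AB': A + B, 'AC': A + C, 'BC': B + C,
--         'ABC': list(range(n)),
--         'D': list(range((r_div + 1) * d, n)),
--     }
-- ===== Notes on version B (the rewrite author's own statement) =====
-- stated objective: faster
-- what changed: Above the hardcoded small-lattice branch, each region A/B/C is built directly from its row-major index ranges instead of classifying every lattice cell in a nested loop, and region D becomes one closed-form tail range instead of filtering all n cells against a set built from A+B+C.
import Mathlib
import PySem

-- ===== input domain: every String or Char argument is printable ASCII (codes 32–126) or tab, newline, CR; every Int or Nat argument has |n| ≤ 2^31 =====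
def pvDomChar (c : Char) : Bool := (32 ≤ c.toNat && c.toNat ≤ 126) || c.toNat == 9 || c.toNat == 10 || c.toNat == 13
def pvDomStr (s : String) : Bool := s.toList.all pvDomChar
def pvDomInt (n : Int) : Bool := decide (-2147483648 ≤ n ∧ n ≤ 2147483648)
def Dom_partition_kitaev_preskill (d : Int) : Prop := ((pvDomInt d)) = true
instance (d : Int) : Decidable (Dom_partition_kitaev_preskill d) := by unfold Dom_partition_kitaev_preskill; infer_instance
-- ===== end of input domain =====

-- B replaces A's cell-by-cell classification loop and the set-membership filter for D by
-- direct index-range constructions of each region (objective: faster; measured faster in a timing run).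

-- ===== PORT A =====
-- the body of A's inner loop over columns (classification of one cell)
def pvCellStep (d r_div c_div : Int) (s : List Int × List Int × List Int) (r c : Int) :
    List Int × List Int × List Int :=
  let idx := r * d + c
  if r < r_div ∧ c < c_div then (s.1 ++ [idx], s.2.1, s.2.2)
  else if r < r_div ∧ c ≥ c_div then (s.1, s.2.1 ++ [idx], s.2.2)
  else if r = r_div then (s.1, s.2.1, s.2.2 ++ [idx])
  else s

def partition_kitaev_preskill (d : Int) : List (String × List Int) :=
  let n := d * d
  if d < 5 then
    let A : List Int := [0]
    let B : List Int := [2]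
    let C : List Int := [3, 6]
    [("A", A), ("B", B), ("C", C),
     ("AB", A ++ B), ("AC", A ++ C), ("BC", B ++ C),
     ("ABC", PySem.List.pyRange 0 n 1),
     ("D", [1, 4, 5, 7, 8])]
  else
    let r_div := PySem.Int.floordiv d 3
    let c_div := PySem.Int.floordiv (2 * d) 3
    let s := (PySem.List.pyRange 0 d 1).foldl
      (fun s r => (PySem.List.pyRange 0 d 1).foldl
        (fun s c => pvCellStep d r_div c_div s r c) s)
      ([], [], [])
    let A := s.1
    let B := s.2.1
    let C := s.2.2
    [("A", A), ("B", B), ("C", C),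
     ("AB", A ++ B), ("AC", A ++ C), ("BC", B ++ C),
     ("ABC", PySem.List.pyRange 0 n 1),
     ("D", (PySem.List.pyRange 0 n 1).filter
        (fun i => !decide (i ∈ PySem.Set.ofList (A ++ B ++ C))))]

-- ===== PORT B =====
def partition_kitaev_preskill_alt (d : Int) : List (String × List Int) :=
  let n := d * d
  if d < 5 then
    let A : List Int := [0]
    let B : List Int := [2]
    let C : List Int := [3, 6]
    [("A", A), ("B", B), ("C", C),
     ("AB", A ++ B), ("AC", A ++ C), ("BC", B ++ C),
     ("ABC", PySem.List.pyRange 0 n 1),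
     ("D", [1, 4, 5, 7, 8])]
  else
    let r_div := PySem.Int.floordiv d 3
    let c_div := PySem.Int.floordiv (2 * d) 3
    let A := (PySem.List.pyRange 0 r_div 1).flatMap
      (fun r => (PySem.List.pyRange 0 c_div 1).map (fun c => r * d + c))
    let B := (PySem.List.pyRange 0 r_div 1).flatMap
      (fun r => (PySem.List.pyRange c_div d 1).map (fun c => r * d + c))
    let C := PySem.List.pyRange (r_div * d) ((r_div + 1) * d) 1
    [("A", A), ("B", B), ("C", C),
     ("AB", A ++ B), ("AC", A ++ C), ("BC", B ++ C),
     ("ABC", PySem.List.pyRange 0 n 1),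
     ("D", PySem.List.pyRange ((r_div + 1) * d) n 1)]

-- ===== PRECONDITION & SPEC =====
def Spec_partition_kitaev_preskill (d : Int) (out : List (String × List Int)) : Prop := out = partition_kitaev_preskill_alt d
instance (d : Int) (out : List (String × List Int)) : Decidable (Spec_partition_kitaev_preskill d out) := by unfold Spec_partition_kitaev_preskill; infer_instance

-- ===== CLAIM (what is proved, stated in full; the proofs are below) =====
def Claim_equal_partition_kitaev_preskill : Prop := ∀ (d : Int), Dom_partition_kitaev_preskill d → Spec_partition_kitaev_preskill d (partition_kitaev_preskill d)

-- ===== LEMMAS AND PROOFS =====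

-- shifted range: mapping (a + ·) over range(0,m) gives range(a, a+m)
theorem pvRange_shift (a m : Int) :
    (PySem.List.pyRange 0 m 1).map (fun c => a + c) = PySem.List.pyRange a (a + m) 1 := by
  simp only [PySem.List.pyRange]
  split_ifs <;> first | omega | simp

-- column fold for a row r < r_div: cells split between A and B
theorem pvFold_rowAB (d r_div c_div r : Int) (hr : r < r_div) :
    ∀ (cs : List Int) (s : List Int × List Int × List Int),
      cs.foldl (fun s c => pvCellStep d r_div c_div s r c) s
        = (s.1 ++ (cs.filter (fun c => decide (c < c_div))).map (fun c => r * d + c),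
           s.2.1 ++ (cs.filter (fun c => !decide (c < c_div))).map (fun c => r * d + c),
           s.2.2) := by
  intro cs
  induction cs with
  | nil => intro s; simp
  | cons c cs ih =>
    intro s
    rw [List.foldl_cons]
    by_cases hc : c < c_div
    · have hstep : pvCellStep d r_div c_div s r c = (s.1 ++ [r * d + c], s.2.1, s.2.2) := by
        simp [pvCellStep, hr, hc]
      rw [hstep, ih]
      simp [hc]
    · have hstep : pvCellStep d r_div c_div s r c = (s.1, s.2.1 ++ [r * d + c], s.2.2) := by
        simp [pvCellStep, hr, hc, not_lt.mp hc]
      rw [hstep, ih]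
      simp [hc]

-- column fold for the row r = r_div: every cell goes to C
theorem pvFold_rowC (d r_div c_div : Int) :
    ∀ (cs : List Int) (s : List Int × List Int × List Int),
      cs.foldl (fun s c => pvCellStep d r_div c_div s r_div c) s
        = (s.1, s.2.1, s.2.2 ++ cs.map (fun c => r_div * d + c)) := by
  intro cs
  induction cs with
  | nil => intro s; simp
  | cons c cs ih =>
    intro s
    rw [List.foldl_cons]
    have hstep : pvCellStep d r_div c_div s r_div c = (s.1, s.2.1, s.2.2 ++ [r_div * d + c]) := by
      simp [pvCellStep]
    rw [hstep, ih]
    simp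

-- column fold for a row r > r_div: nothing happens
theorem pvFold_rowD (d r_div c_div r : Int) (hr : r_div < r) :
    ∀ (cs : List Int) (s : List Int × List Int × List Int),
      cs.foldl (fun s c => pvCellStep d r_div c_div s r c) s = s := by
  intro cs
  induction cs with
  | nil => intro s; rfl
  | cons c cs ih =>
    intro s
    rw [List.foldl_cons]
    have hstep : pvCellStep d r_div c_div s r c = s := by
      have h1 : ¬ r < r_div := by omega
      have h2 : ¬ r = r_div := by omega
      simp [pvCellStep, h1, h2]
    rw [hstep, ih]

-- outer fold over rows below r_div
theorem pvFold_outerAB (d r_div c_div : Int) :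
    ∀ (rs : List Int), (∀ r ∈ rs, r < r_div) →
      ∀ (s : List Int × List Int × List Int),
      rs.foldl (fun s r => (PySem.List.pyRange 0 d 1).foldl
          (fun s c => pvCellStep d r_div c_div s r c) s) s
        = (s.1 ++ rs.flatMap (fun r => ((PySem.List.pyRange 0 d 1).filter
              (fun c => decide (c < c_div))).map (fun c => r * d + c)),
           s.2.1 ++ rs.flatMap (fun r => ((PySem.List.pyRange 0 d 1).filter
              (fun c => !decide (c < c_div))).map (fun c => r * d + c)),
           s.2.2) := by
  intro rs
  induction rs with
  | nil => intro _ s; simp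
  | cons r rs ih =>
    intro hmem s
    have hr : r < r_div := hmem r (List.mem_cons_self ..)
    simp only [List.foldl_cons, pvFold_rowAB d r_div c_div r hr,
      ih (fun x hx => hmem x (List.mem_cons_of_mem r hx)), List.flatMap_cons]
    simp [List.append_assoc]

-- outer fold over rows above r_div
theorem pvFold_outerD (d r_div c_div : Int) :
    ∀ (rs : List Int), (∀ r ∈ rs, r_div < r) →
      ∀ (s : List Int × List Int × List Int),
      rs.foldl (fun s r => (PySem.List.pyRange 0 d 1).foldl
          (fun s c => pvCellStep d r_div c_div s r c) s) s = s := by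
  intro rs
  induction rs with
  | nil => intro _ s; rfl
  | cons r rs ih =>
    intro hmem s
    rw [List.foldl_cons,
      pvFold_rowD d r_div c_div r (hmem r (List.mem_cons_self ..)) _ s,
      ih (fun x hx => hmem x (List.mem_cons_of_mem r hx))]

-- filtering a range against a cut point m
theorem pvFilter_range_lt (a m b : Int) (h1 : a ≤ m) (h2 : m ≤ b) :
    (PySem.List.pyRange a b 1).filter (fun c => decide (c < m)) = PySem.List.pyRange a m 1 := by
  rw [PySem.List.pyRange_one_append a m b h1 h2, List.filter_append]
  have e1 : (PySem.List.pyRange a m 1).filter (fun c => decide (c < m)) = PySem.List.pyRange a m 1 := by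
    apply List.filter_eq_self.mpr
    intro x hx
    simp [PySem.List.mem_pyRange_one.mp hx]
  have e2 : (PySem.List.pyRange m b 1).filter (fun c => decide (c < m)) = [] := by
    apply List.filter_eq_nil_iff.mpr
    intro x hx
    simp [PySem.List.mem_pyRange_one.mp hx, not_lt]
  rw [e1, e2, List.append_nil]

theorem pvFilter_range_ge (a m b : Int) (h1 : a ≤ m) (h2 : m ≤ b) :
    (PySem.List.pyRange a b 1).filter (fun c => !decide (c < m)) = PySem.List.pyRange m b 1 := by
  rw [PySem.List.pyRange_one_append a m b h1 h2, List.filter_append]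
  have e1 : (PySem.List.pyRange a m 1).filter (fun c => !decide (c < m)) = [] := by
    apply List.filter_eq_nil_iff.mpr
    intro x hx
    simp [PySem.List.mem_pyRange_one.mp hx]
  have e2 : (PySem.List.pyRange m b 1).filter (fun c => !decide (c < m)) = PySem.List.pyRange m b 1 := by
    apply List.filter_eq_self.mpr
    intro x hx
    have := PySem.List.mem_pyRange_one.mp hx
    simp; omega
  rw [e1, e2, List.nil_append]

-- membership in A ∪ B ∪ C (in B's explicit form) is exactly 0 ≤ i < (r_div+1)*d
theorem pvMem_union (d r_div c_div i : Int) (hd : 0 < d) (h0R : 0 ≤ r_div)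
    (h0C : 0 ≤ c_div) (hCd : c_div ≤ d) :
    (i ∈ (PySem.List.pyRange 0 r_div 1).flatMap
        (fun r => (PySem.List.pyRange 0 c_div 1).map (fun c => r * d + c)) ∨
     i ∈ (PySem.List.pyRange 0 r_div 1).flatMap
        (fun r => (PySem.List.pyRange c_div d 1).map (fun c => r * d + c)) ∨
     i ∈ PySem.List.pyRange (r_div * d) ((r_div + 1) * d) 1)
    ↔ (0 ≤ i ∧ i < (r_div + 1) * d) := by
  constructor
  · rintro (h | h | h)
    · obtain ⟨r, ⟨hr0, hr1⟩, c, ⟨hc0, hc1⟩, rfl⟩ := by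
        simpa [List.mem_flatMap, List.mem_map, PySem.List.mem_pyRange_one] using h
      have hub : (r + 1) * d ≤ (r_div + 1) * d :=
        mul_le_mul_of_nonneg_right (by omega) (le_of_lt hd)
      constructor
      · positivity
      · nlinarith
    · obtain ⟨r, ⟨hr0, hr1⟩, c, ⟨hc0, hc1⟩, rfl⟩ := by
        simpa [List.mem_flatMap, List.mem_map, PySem.List.mem_pyRange_one] using h
      have hub : (r + 1) * d ≤ (r_div + 1) * d :=
        mul_le_mul_of_nonneg_right (by omega) (le_of_lt hd)
      constructor
      · have : 0 ≤ r * d := mul_nonneg hr0 (le_of_lt hd)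
        omega
      · nlinarith
    · have := PySem.List.mem_pyRange_one.mp h
      have : 0 ≤ r_div * d := mul_nonneg h0R (le_of_lt hd)
      omega
  · rintro ⟨hi0, hi1⟩
    set r := i / d with hrdef
    set c := i % d with hcdef
    have hdecomp : d * r + c = i := Int.mul_ediv_add_emod i d
    have hdecomp' : r * d + c = i := by rw [mul_comm r d]; exact hdecomp
    have hc0 : 0 ≤ c := Int.emod_nonneg i (by omega)
    have hc1 : c < d := Int.emod_lt_of_pos i hd
    have hr0 : 0 ≤ r := Int.ediv_nonneg hi0 (le_of_lt hd)
    have hr1 : r < r_div + 1 := by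
      rw [hrdef]
      exact Int.ediv_lt_iff_lt_mul hd |>.mpr hi1
    by_cases hcase : r < r_div
    · by_cases hcc : c < c_div
      · left
        simp only [List.mem_flatMap, List.mem_map, PySem.List.mem_pyRange_one]
        exact ⟨r, ⟨hr0, hcase⟩, c, ⟨hc0, hcc⟩, by omega⟩
      · right; left
        simp only [List.mem_flatMap, List.mem_map, PySem.List.mem_pyRange_one]
        exact ⟨r, ⟨hr0, hcase⟩, c, ⟨by omega, hc1⟩, by omega⟩
    · right; right
      have hreq : r = r_div := by omega
      rw [PySem.List.mem_pyRange_one]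
      constructor <;> nlinarith [hdecomp, hreq]

-- ===== VERDICT (by name: the statement is the Claim_ definition above) =====
theorem partition_kitaev_preskill_spec : Claim_equal_partition_kitaev_preskill := by
  intro d _
  unfold Spec_partition_kitaev_preskill
  by_cases h5 : d < 5
  · simp [partition_kitaev_preskill, partition_kitaev_preskill_alt, h5]
  · have hd : 0 < d := by omega
    simp only [partition_kitaev_preskill, partition_kitaev_preskill_alt, if_neg h5]
    set R := PySem.Int.floordiv d 3 with hR
    set Cd := PySem.Int.floordiv (2 * d) 3 with hCd
    have h0R : 1 ≤ R := (PySem.Int.le_floordiv_iff_mul_le (by omega)).mpr (by omega)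
    have hRd : R < d := (PySem.Int.floordiv_lt_iff_lt_mul (by omega)).mpr (by nlinarith)
    have h0C : 0 ≤ Cd := (PySem.Int.le_floordiv_iff_mul_le (by omega)).mpr (by omega)
    have hCdd : Cd ≤ d := le_of_lt ((PySem.Int.floordiv_lt_iff_lt_mul (by omega)).mpr (by nlinarith))
    -- split the rows at R and R+1
    have hsplit : PySem.List.pyRange 0 d 1
        = PySem.List.pyRange 0 R 1 ++ PySem.List.pyRange R (R + 1) 1 ++ PySem.List.pyRange (R + 1) d 1 := by
      rw [← PySem.List.pyRange_one_append 0 R (R + 1) (by omega) (by omega),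
          ← PySem.List.pyRange_one_append 0 (R + 1) d (by omega) (by omega)]
    have hsingle : PySem.List.pyRange R (R + 1) 1 = [R] := by
      rw [PySem.List.pyRange_one_cons (by omega : R < R + 1)]
      simp [PySem.List.pyRange]
    have hstate : (PySem.List.pyRange 0 d 1).foldl
        (fun s r => (PySem.List.pyRange 0 d 1).foldl
          (fun s c => pvCellStep d R Cd s r c) s)
        (([], [], []) : List Int × List Int × List Int)
        = ((PySem.List.pyRange 0 R 1).flatMap
             (fun r => (PySem.List.pyRange 0 Cd 1).map (fun c => r * d + c)),
           (PySem.List.pyRange 0 R 1).flatMap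
             (fun r => (PySem.List.pyRange Cd d 1).map (fun c => r * d + c)),
           PySem.List.pyRange (R * d) ((R + 1) * d) 1) := by
      set F := fun (s : List Int × List Int × List Int) (r : Int) =>
        (PySem.List.pyRange 0 d 1).foldl (fun s c => pvCellStep d R Cd s r c) s with hF
      rw [hsplit, hF, List.foldl_append, List.foldl_append,
        pvFold_outerAB d R Cd _ (fun r hr => (PySem.List.mem_pyRange_one.mp hr).2),
        hsingle]
      simp only [List.foldl_cons, List.foldl_nil, pvFold_rowC]
      rw [pvFold_outerD d R Cd _ (fun r hr => (PySem.List.mem_pyRange_one.mp hr).1)]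
      rw [pvFilter_range_lt 0 Cd d h0C hCdd, pvFilter_range_ge 0 Cd d h0C hCdd]
      have hCshift : (PySem.List.pyRange 0 d 1).map (fun c => R * d + c)
          = PySem.List.pyRange (R * d) ((R + 1) * d) 1 := by
        rw [pvRange_shift (R * d) d]
        ring_nf
      simp [hCshift]
    rw [hstate]
    -- the D entry: the set-membership filter equals a tail range
    have hDfilter : (PySem.List.pyRange 0 (d * d) 1).filter
        (fun i => !decide (i ∈ PySem.Set.ofList
          ((PySem.List.pyRange 0 R 1).flatMap
             (fun r => (PySem.List.pyRange 0 Cd 1).map (fun c => r * d + c)) ++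
           (PySem.List.pyRange 0 R 1).flatMap
             (fun r => (PySem.List.pyRange Cd d 1).map (fun c => r * d + c)) ++
           PySem.List.pyRange (R * d) ((R + 1) * d) 1)))
        = PySem.List.pyRange ((R + 1) * d) (d * d) 1 := by
      have hcut0 : 0 ≤ (R + 1) * d := mul_nonneg (by omega) (le_of_lt hd)
      have hcutn : (R + 1) * d ≤ d * d := by nlinarith
      rw [← pvFilter_range_ge 0 ((R + 1) * d) (d * d) hcut0 hcutn]
      apply List.filter_congr
      intro i hi
      have hi' := PySem.List.mem_pyRange_one.mp hi
      have hnm : (i ∈ PySem.Set.ofList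
          ((PySem.List.pyRange 0 R 1).flatMap
             (fun r => (PySem.List.pyRange 0 Cd 1).map (fun c => r * d + c)) ++
           (PySem.List.pyRange 0 R 1).flatMap
             (fun r => (PySem.List.pyRange Cd d 1).map (fun c => r * d + c)) ++
           PySem.List.pyRange (R * d) ((R + 1) * d) 1))
          ↔ (0 ≤ i ∧ i < (R + 1) * d) := by
        rw [PySem.Set.mem_ofList]
        simpa [List.mem_append, or_assoc] using pvMem_union d R Cd i hd (by omega) h0C hCdd
      simp at hnm ⊢
      rw [hnm]
      omega
    rw [hDfilter]
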